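-- pv_equiv track=rewrite | github.com/GuilhermeGabriel/GuilhermeGabriel-PythonStudies | python_bases_exercicies/main.py | hex_to_bin_blocagem
-- ===== SOURCE A (Python) =====
-- def decimal_to_bin(num):
--     num_list = []
--
--     while int(num) >= 2:
--         rest = int(num) % 2
--         num = int(num) // 2
--
--         num_list.insert(0, rest)
--
--     num_list.insert(0, num)  # num_list é um vetor com os algarismos do resultado
--     num_value = ''.join(list(map(str, num_list)))  # Transforma cada algarismo em uma
--     # string e depois junta e trasforma essa string um int
--
--     return int(num_value)
--
-- def get_num_hex(alga):
--     alga_hex_list = ['A', 'B', 'C', 'D', 'E', 'F']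
--     num_hex_list = [10, 11, 12, 13, 14, 15]
--
--     if alga.upper() in alga_hex_list:
--         return num_hex_list[alga_hex_list.index(alga.upper())]
--     else:
--         return int(alga)
--
-- def hex_to_bin_blocagem(num):
--     block = []
--
--     for i in range(len(num) - 1, -1, -1):
--
--         block_in_bin = list(str(
--             decimal_to_bin(get_num_hex(num[i]))
--         ))
--
--         while len(block_in_bin) < 4:
--             block_in_bin.insert(0, '0')
--
--         block.insert(0, block_in_bin)
--
--     return block
-- ===== SOURCE B (Python) =====
-- def hex_to_bin_blocagem(num):
--     return [list(format(int(c, 16), '04b')) for c in num]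
-- ===== Notes on version B (the rewrite author's own statement) =====
-- stated objective: idiomatic
-- what changed: A's reversed index loop with front-insertion, hand-written repeated-division-by-2 binary conversion (via a decimal string round-trip) and A-F lookup table are replaced by a forward comprehension converting each character with int(c, 16) and the 4-digit binary format specifier.
import Mathlib
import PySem

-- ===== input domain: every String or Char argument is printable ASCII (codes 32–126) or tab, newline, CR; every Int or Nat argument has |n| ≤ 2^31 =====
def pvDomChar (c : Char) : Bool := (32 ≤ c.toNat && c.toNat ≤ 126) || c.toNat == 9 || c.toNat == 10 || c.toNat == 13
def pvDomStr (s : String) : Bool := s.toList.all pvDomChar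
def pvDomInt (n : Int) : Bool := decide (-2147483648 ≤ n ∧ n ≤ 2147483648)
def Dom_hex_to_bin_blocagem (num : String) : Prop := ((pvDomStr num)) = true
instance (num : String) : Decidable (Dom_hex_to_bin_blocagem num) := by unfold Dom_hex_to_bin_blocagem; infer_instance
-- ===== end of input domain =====

-- B replaces A's reversed index loop, hand-rolled division-by-2 binary conversion and A-F table
-- by a forward per-character comprehension (more idiomatic; A's front-insertions make it quadratic, B is linear).


-- ===== PORT A =====

-- while int(num) >= 2: …  — fuel only makes the loop total (numHex.toNat + 1 steps always suffice);
-- returns the final num and the accumulated digit list (each iteration inserts rest at index 0)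
def pvDecToBinLoop : Nat → Int → List Int → Int × List Int
  | 0, n, acc => (n, acc)
  | fuel + 1, n, acc =>
    if 2 ≤ n then pvDecToBinLoop fuel (PySem.Int.floordiv n 2) (PySem.Int.mod n 2 :: acc)
    else (n, acc)

-- def decimal_to_bin(num): … — join of str digits, then int() of that string
def decimal_to_bin (num : Int) : Int :=
  let p := pvDecToBinLoop (num.toNat + 1) num []
  let num_list := p.1 :: p.2
  let num_value := PySem.Chars.join [] (num_list.map PySem.Int.toChars)
  (PySem.Int.ofChars? num_value).getD 0   -- the string is digits of an int: int() always succeeds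

-- def get_num_hex(alga): …  (alga is the 1-char string num[i], held as a Char; none = ValueError of int(alga))
def get_num_hex (alga : Char) : Option Int :=
  let alga_hex_list : List Char := ['A', 'B', 'C', 'D', 'E', 'F']
  let num_hex_list : List Int := [10, 11, 12, 13, 14, 15]
  if PySem.Chars.upperChar alga ∈ alga_hex_list then
    some (PySem.List.pyGetD num_hex_list
      (((PySem.List.index? alga_hex_list (PySem.Chars.upperChar alga)).getD 0 : Nat) : Int) 0)
  else
    PySem.Int.ofChars? [alga]

-- while len(block_in_bin) < 4: block_in_bin.insert(0, '0')  — fuel 4 suffices (the list is nonempty)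
def pvPadLoop : Nat → List String → List String
  | 0, l => l
  | fuel + 1, l => if l.length < 4 then pvPadLoop fuel ("0" :: l) else l

-- list(str(x)): the list of 1-character strings
def pvStrList (cs : List Char) : List String := cs.map (fun ch => String.ofList [ch])

-- loop body of A: block_in_bin for one character (getD defaults are unreachable under Pre_)
def pvBlockA (c : Char) : List String :=
  pvPadLoop 4 (pvStrList (PySem.Int.toChars (decimal_to_bin ((get_num_hex c).getD 0))))

def hex_to_bin_blocagem (num : String) : List (List String) :=
  (PySem.List.pyRange ((PySem.Str.len num : Int) - 1) (-1) (-1)).foldl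
    (fun block i => pvBlockA ((PySem.Str.pyGet? num i).getD ' ') :: block) []

-- ===== PORT B =====

-- loop body of B: the 4-digit binary block of int(c, 16) (ofCharsBase? = int with base; zfill of toBinChars = zero-padded binary format)
def pvBlockB (c : Char) : List String :=
  pvStrList (PySem.Chars.zfill (PySem.Int.toBinChars ((PySem.Int.ofCharsBase? [c] 16).getD 0)) 4)

def hex_to_bin_blocagem_alt (num : String) : List (List String) :=
  num.toList.map pvBlockB

-- the hexadecimal digits — exactly the characters both Pythons accept
def pvHexChars : List Char :=
  ['0','1','2','3','4','5','6','7','8','9','a','b','c','d','e','f','A','B','C','D','E','F']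

-- ===== PRECONDITION & SPEC =====
-- Pre_ excludes exactly the inputs on which both Pythons raise ValueError: any character that
-- is not a hexadecimal digit (int(alga) in A / int(c, 16) in B fail there).
def Pre_hex_to_bin_blocagem (num : String) : Prop :=
  num.toList ⊆ pvHexChars
instance (num : String) : Decidable (Pre_hex_to_bin_blocagem num) := by
  unfold Pre_hex_to_bin_blocagem; infer_instance

def pvWitness_hex_to_bin_blocagem : String := "1aF0"

def Spec_hex_to_bin_blocagem (num : String) (out : List (List String)) : Prop := out = hex_to_bin_blocagem_alt num
instance (num : String) (out : List (List String)) : Decidable (Spec_hex_to_bin_blocagem num out) := by unfold Spec_hex_to_bin_blocagem; infer_instance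

-- ===== CLAIM (what is proved, stated in full; the proofs are below) =====
def Claim_equal_hex_to_bin_blocagem : Prop := ∀ (num : String), Dom_hex_to_bin_blocagem num → Pre_hex_to_bin_blocagem num → Spec_hex_to_bin_blocagem num (hex_to_bin_blocagem num)

-- ===== LEMMAS AND PROOFS =====

-- on every hexadecimal digit the two per-character block computations agree
theorem pvBlockA_eq_pvBlockB : ∀ c ∈ pvHexChars, pvBlockA c = pvBlockB c := by
  intro c hc
  fin_cases hc <;> decide

-- A's countdown fold with front insertion builds the forward map of pvBlockA over the first n chars
theorem pvLoopA_eq_map (cs : List Char) (n : Nat) (hn : n ≤ cs.length) (block : List (List String)) :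
    (PySem.List.pyRange ((n : Int) - 1) (-1) (-1)).foldl
      (fun block i => pvBlockA ((PySem.List.pyGet? cs i).getD ' ') :: block) block
    = (cs.take n).map pvBlockA ++ block := by
  induction n generalizing block with
  | zero => simp [PySem.List.pyRange_neg_one_eq_nil]
  | succ m ih =>
    have h1 : ((m + 1 : Nat) : Int) - 1 = (m : Int) := by push_cast; ring
    have hm : m < cs.length := by omega
    have hget : PySem.List.pyGet? cs (m : Int) = some cs[m] := by
      simp [List.getElem?_eq_getElem hm]
    rw [h1, PySem.List.pyRange_neg_one_cons (by omega : (-1 : Int) < (m : Int))]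
    simp only [List.foldl_cons, hget, Option.getD_some]
    rw [ih (by omega)]
    have ht : List.take (m + 1) cs = List.take m cs ++ [cs[m]] := by
      rw [List.take_add_one, List.getElem?_eq_getElem hm]; rfl
    rw [ht, List.map_append, List.append_assoc]; rfl

-- ===== VERDICT (by name: the statement is the Claim_ definition above) =====
theorem hex_to_bin_blocagem_spec : Claim_equal_hex_to_bin_blocagem := by
  intro num _ hpre
  unfold Spec_hex_to_bin_blocagem hex_to_bin_blocagem hex_to_bin_blocagem_alt
  have hlen : PySem.Str.len num = num.toList.length := by simp [PySem.Str.len_eq]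
  have hget : ∀ i, PySem.Str.pyGet? num i = PySem.List.pyGet? num.toList i := by
    intro i; simp
  simp only [hlen, hget]
  rw [pvLoopA_eq_map num.toList num.toList.length le_rfl []]
  rw [List.take_length, List.append_nil]
  exact List.map_congr_left (fun c hc => pvBlockA_eq_pvBlockB c (hpre hc))
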